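-- pv_equiv track=rewrite | github.com/acm-wiliam/Fuse | utils/max_via_OT.py | compare_01_values
-- ===== SOURCE A (Python) =====
-- def compare_01_values(a, b, bit_precision=16):
--     """
--     比较[0,1]范围内的两个数，确定哪个更大
--
--     参数:
--         a, b: 范围在[0,1]的固定点数值，用整数表示（假设已经乘以2^bit_precision）
--         bit_precision: 表示精度的位数
--
--     返回:
--         如果a>=b返回1，否则返回0
--     """
--     # 对于[0,1]范围内的值，我们只需要比较每一位，从最高位开始
--     # 找出a和b中第一个不同的位
--     diff = a ^ b  # 找出不同的位
--
--     if diff == 0:  # a和b完全相等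
--         return 1  # a>=b
--
--     # 找到最高不同位
--     # 在[0,1]范围内，最高位不同时，谁的该位为1谁就更大
--     highest_diff_bit = 1 << (bit_precision - 1)
--
--     # 从最高位开始检查
--     for i in range(bit_precision-1, -1, -1):
--         mask = 1 << i
--         if (diff & mask) != 0:  # 找到了不同位
--             # 检查a的该位是否为1
--             return 1 if (a & mask) != 0 else 0
--
--     return 1  # 默认情况，a==b时返回1
-- ===== SOURCE B (Python) =====
-- def compare_01_values(a, b, bit_precision=16):
--     # Masked numeric comparison: keeping only the low bit_precision bits of each
--     # operand, >= is decided exactly by the highest differing kept bit.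
--     low_mask = (1 << bit_precision) - 1
--     return 1 if (a & low_mask) >= (b & low_mask) else 0
-- ===== Notes on version B (the rewrite author's own statement) =====
-- stated objective: faster
-- what changed: O(bit_precision) bit-scan loop becomes one O(1) masked comparison: replaces the XOR plus highest-differing-bit scan over range(bit_precision-1,-1,-1) with a single masked numeric comparison (a & L) >= (b & L), L = 2^bit_precision - 1.
-- outside the precondition, e.g. on compare_01_values(0, 0, -1): A returns 1, B raises ValueError; on compare_01_values(0, 0, 0): A returns 1, B returns 1
import Mathlib
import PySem

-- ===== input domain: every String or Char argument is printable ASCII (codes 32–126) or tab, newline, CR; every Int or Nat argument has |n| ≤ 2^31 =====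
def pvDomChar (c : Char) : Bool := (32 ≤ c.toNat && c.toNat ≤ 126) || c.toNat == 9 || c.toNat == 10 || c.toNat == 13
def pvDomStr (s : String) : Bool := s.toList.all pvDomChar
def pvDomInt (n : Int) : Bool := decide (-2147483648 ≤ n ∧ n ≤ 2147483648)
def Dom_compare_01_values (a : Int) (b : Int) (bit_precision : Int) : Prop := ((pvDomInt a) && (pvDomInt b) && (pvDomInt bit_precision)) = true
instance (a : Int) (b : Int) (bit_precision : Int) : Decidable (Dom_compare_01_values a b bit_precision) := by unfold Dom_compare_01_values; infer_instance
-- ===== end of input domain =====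

-- B replaces A's XOR-and-highest-differing-bit scan with a single masked numeric comparison (simpler).

-- ===== PORT A =====
-- the 'for i in range(bit_precision-1, -1, -1): …' loop with its two early returns;
-- every i produced by this range is ≥ 0, so Python's '1 << i' is exactly '(1 : Int) <<< i.toNat'
def cmpLoop (a : Int) (diff : Int) : List Int → Int
  | [] => 1                                   -- loop fell through: 'return 1'
  | i :: rest =>
    let mask : Int := (1 : Int) <<< i.toNat
    if PySem.Int.band diff mask ≠ 0 then
      (if PySem.Int.band a mask ≠ 0 then 1 else 0)
    else cmpLoop a diff rest

def compare_01_values (a : Int) (b : Int) (bit_precision : Int) : Int :=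
  let diff := PySem.Int.bxor a b
  if diff = 0 then 1
  else
    -- Python also binds highest_diff_bit = 1 << (bit_precision - 1), which is never used;
    -- that shift raises ValueError for bit_precision ≤ 0, excluded by Pre_ below.
    cmpLoop a diff (PySem.List.pyRange (bit_precision - 1) (-1) (-1))

-- ===== PORT B =====
def compare_01_values_alt (a : Int) (b : Int) (bit_precision : Int) : Int :=
  -- '1 << bit_precision' raises for negative bit_precision (outside Pre_); .toNat is exact for bit_precision ≥ 0
  let low_mask : Int := ((1 : Int) <<< bit_precision.toNat) - 1
  if PySem.Int.band b low_mask ≤ PySem.Int.band a low_mask then 1 else 0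

-- ===== PRECONDITION & SPEC =====
-- Pre_ excludes bit_precision < 1: there A raises ValueError whenever a ≠ b (and B raises ValueError
-- for every negative bit_precision); the only excluded inputs on which A still returns have a = b or
-- bit_precision = 0, and A returns 1 on them.
def Pre_compare_01_values (a : Int) (b : Int) (bit_precision : Int) : Prop := 1 ≤ bit_precision
instance (a : Int) (b : Int) (bit_precision : Int) : Decidable (Pre_compare_01_values a b bit_precision) := by unfold Pre_compare_01_values; infer_instance
def pvWitness_compare_01_values : Int × Int × Int := (3, 5, 4)

def Spec_compare_01_values (a : Int) (b : Int) (bit_precision : Int) (out : Int) : Prop := out = compare_01_values_alt a b bit_precision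
instance (a : Int) (b : Int) (bit_precision : Int) (out : Int) : Decidable (Spec_compare_01_values a b bit_precision out) := by unfold Spec_compare_01_values; infer_instance

-- ===== CLAIM (what is proved, stated in full; the proofs are below) =====
def Claim_equal_compare_01_values : Prop := ∀ (a : Int) (b : Int) (bit_precision : Int), Dom_compare_01_values a b bit_precision → Pre_compare_01_values a b bit_precision → Spec_compare_01_values a b bit_precision (compare_01_values a b bit_precision)

-- ===== LEMMAS AND PROOFS =====

theorem nat_testBit_toNat (x i : Nat) : (x.testBit i).toNat = x / 2 ^ i % 2 := by
  have h : x.testBit i = (x / 2 ^ i % 2 != 0) := by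
    rw [Nat.testBit, Nat.and_comm, Nat.and_one_is_mod, Nat.shiftRight_eq_div_pow]
  rw [h]
  rcases Nat.mod_two_eq_zero_or_one (x / 2 ^ i) with h0 | h0 <;> simp [h0]

theorem nat_mod_two_pow_succ (x n : Nat) :
    x % 2 ^ (n + 1) = x % 2 ^ n + 2 ^ n * (x.testBit n).toNat := by
  rw [Nat.mod_pow_succ, nat_testBit_toNat]

theorem neg_emod_two_pow (m : Nat) (n : Nat) :
    (-(m : Int) - 1) % 2 ^ n = 2 ^ n - 1 - (m : Int) % 2 ^ n := by
  have h1 : (0 : Int) < 2 ^ n := by positivity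
  have h2 : (0 : Int) ≤ (m : Int) % 2 ^ n := Int.emod_nonneg _ (by omega)
  have h3 : (m : Int) % 2 ^ n < 2 ^ n := Int.emod_lt_of_pos _ h1
  have key : -(m : Int) - 1 = (2 ^ n - 1 - (m : Int) % 2 ^ n) + 2 ^ n * (-((m : Int) / 2 ^ n) - 1) := by
    have h := Int.emod_add_mul_ediv (m : Int) (2 ^ n)
    ring_nf
    ring_nf at h
    omega
  rw [key, Int.add_mul_emod_self_left, Int.emod_eq_of_lt (by omega) (by omega)]

theorem cast_emod_two_pow (m : Nat) (j : Nat) :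
    (m : Int) % 2 ^ j = ((m % 2 ^ j : Nat) : Int) := by
  push_cast
  ring

theorem testBit_arith (x : Int) (n : Nat) :
    x % 2 ^ (n + 1) - x % 2 ^ n = (if x.testBit n then (2 ^ n : Int) else 0) := by
  have h2 : ((2 : Int) ^ (n + 1)) = 2 * 2 ^ n := by ring
  rcases x with m | m
  · have hs := nat_mod_two_pow_succ m n
    have hp : ∀ j : Nat, ((2 ^ j : Nat) : Int) = (2 : Int) ^ j := by intro j; push_cast; ring
    show (m : Int) % 2 ^ (n + 1) - (m : Int) % 2 ^ n = (if Nat.testBit m n then (2 ^ n : Int) else 0)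
    rw [cast_emod_two_pow, cast_emod_two_pow]
    have hpn := hp n
    cases htb : m.testBit n <;> rw [htb] at hs <;> simp at hs <;> simp only [Bool.false_eq_true, if_true, if_false, ite_true, ite_false] <;> omega
  · have hx : (Int.negSucc m) = -(m : Int) - 1 := by rw [Int.negSucc_eq]; ring
    have hs := nat_mod_two_pow_succ m n
    have hp : ∀ j : Nat, ((2 ^ j : Nat) : Int) = (2 : Int) ^ j := by intro j; push_cast; ring
    have htb' : (Int.negSucc m).testBit n = !m.testBit n := rfl
    rw [htb', hx, neg_emod_two_pow, neg_emod_two_pow, cast_emod_two_pow, cast_emod_two_pow]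
    have hpn := hp n
    have hpn1 := hp (n + 1)
    have h2' : ((2:Int)) ^ (n+1) = 2 * 2 ^ n := by ring
    cases htb : m.testBit n <;> rw [htb] at hs <;> simp at hs <;>
      simp only [Bool.not_false, Bool.not_true, Bool.false_eq_true, if_true, if_false, ite_true, ite_false] <;> omega

theorem toNat_two_pow (n : Nat) : ((2 : Int) ^ n).toNat = 2 ^ n := by
  have h : ((2 : Int) ^ n) = ((2 ^ n : Nat) : Int) := by push_cast; ring
  rw [h, Int.toNat_natCast]

theorem toNat_two_pow_sub_one (n : Nat) : ((2 : Int) ^ n - 1).toNat = 2 ^ n - 1 := by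
  have h : ((2 : Int) ^ n) = ((2 ^ n : Nat) : Int) := by push_cast; ring
  have hp : 0 < 2 ^ n := Nat.pow_pos (by omega)
  omega

theorem band_two_pow (x : Int) (n : Nat) :
    PySem.Int.band x (2 ^ n) = (if x.testBit n then (2 ^ n : Int) else 0) := by
  have hp : (0 : Int) ≤ 2 ^ n := by positivity
  rcases x with m | m
  · have hm : (0 : Int) ≤ Int.ofNat m := Int.natCast_nonneg m
    rw [PySem.Int.band, if_pos hm, if_pos hp]
    have htn : (Int.ofNat m).toNat = m := rfl
    rw [htn, toNat_two_pow, Nat.and_two_pow]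
    show ((((m.testBit n).toNat * 2 ^ n : Nat)) : Int) = (if Nat.testBit m n then (2 ^ n : Int) else 0)
    have hpw : ((2 ^ n : Nat) : Int) = (2 : Int) ^ n := by push_cast; ring
    cases htb : m.testBit n <;> simp [htb] <;> omega
  · have hx : (Int.negSucc m) = -(m : Int) - 1 := by rw [Int.negSucc_eq]; ring
    have hm : ¬ (0 : Int) ≤ Int.negSucc m := by rw [hx]; omega
    rw [PySem.Int.band, if_neg hm, if_pos hp]
    have htn : (-(Int.negSucc m) - 1).toNat = m := by rw [hx]; omega
    rw [htn, toNat_two_pow, Nat.and_comm, Nat.and_two_pow]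
    have htb' : (Int.negSucc m).testBit n = !m.testBit n := rfl
    rw [htb']
    have hpw : ((2 ^ n : Nat) : Int) = (2 : Int) ^ n := by push_cast; ring
    have hle : (m.testBit n).toNat * 2 ^ n ≤ 2 ^ n := by
      cases htb : m.testBit n <;> simp
    cases htb : m.testBit n <;> simp [htb] <;> omega

theorem band_mask (x : Int) (n : Nat) :
    PySem.Int.band x (2 ^ n - 1) = x % 2 ^ n := by
  have h1 : (0 : Int) < 2 ^ n := by positivity
  have hp : (0 : Int) ≤ 2 ^ n - 1 := by omega
  have hpw : ((2 ^ n : Nat) : Int) = (2 : Int) ^ n := by push_cast; ring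
  rcases x with m | m
  · have hm : (0 : Int) ≤ Int.ofNat m := Int.natCast_nonneg m
    rw [PySem.Int.band, if_pos hm, if_pos hp]
    have htn : (Int.ofNat m).toNat = m := rfl
    rw [htn, toNat_two_pow_sub_one, Nat.and_two_pow_sub_one_eq_mod]
    show ((m % 2 ^ n : Nat) : Int) = (m : Int) % 2 ^ n
    rw [cast_emod_two_pow]
  · have hx : (Int.negSucc m) = -(m : Int) - 1 := by rw [Int.negSucc_eq]; ring
    have hm : ¬ (0 : Int) ≤ Int.negSucc m := by rw [hx]; omega
    rw [PySem.Int.band, if_neg hm, if_pos hp]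
    have htn : (-(Int.negSucc m) - 1).toNat = m := by rw [hx]; omega
    rw [htn, toNat_two_pow_sub_one, Nat.and_comm, Nat.and_two_pow_sub_one_eq_mod]
    have hlt : m % 2 ^ n < 2 ^ n := Nat.mod_lt m (Nat.pow_pos (by omega))
    rw [hx, neg_emod_two_pow]
    have hc := cast_emod_two_pow m n
    omega

theorem bxor_eq_xor (a b : Int) : PySem.Int.bxor a b = Int.xor a b := by
  rcases a with m | m <;> rcases b with k | k
  · show PySem.Int.bxor (m : Int) (k : Int) = ((m ^^^ k : Nat) : Int)
    rw [PySem.Int.bxor, if_pos (Int.natCast_nonneg m), if_pos (Int.natCast_nonneg k)]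
    simp
  · have hk : (Int.negSucc k) = -(k : Int) - 1 := by rw [Int.negSucc_eq]; ring
    show PySem.Int.bxor (m : Int) _ = Int.negSucc (m ^^^ k)
    rw [PySem.Int.bxor, if_pos (Int.natCast_nonneg m), if_neg (by rw [hk]; omega)]
    have h2 : (- -((k:Int) + 1) - 1).toNat = k := by omega
    simp [h2, Int.negSucc_eq]
    ring
  · have hm : (Int.negSucc m) = -(m : Int) - 1 := by rw [Int.negSucc_eq]; ring
    show PySem.Int.bxor _ (k : Int) = Int.negSucc (m ^^^ k)
    rw [PySem.Int.bxor, if_neg (by rw [hm]; omega), if_pos (Int.natCast_nonneg k)]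
    have h2 : (- -((m:Int) + 1) - 1).toNat = m := by omega
    simp [h2, Int.negSucc_eq]
    ring
  · have hm : (Int.negSucc m) = -(m : Int) - 1 := by rw [Int.negSucc_eq]; ring
    have hk : (Int.negSucc k) = -(k : Int) - 1 := by rw [Int.negSucc_eq]; ring
    show PySem.Int.bxor _ _ = ((m ^^^ k : Nat) : Int)
    rw [PySem.Int.bxor, if_neg (by rw [hm]; omega), if_neg (by rw [hk]; omega)]
    rw [hm, hk]
    have h1 : (-(-(m:Int) - 1) - 1).toNat = m := by omega
    have h2 : (-(-(k:Int) - 1) - 1).toNat = k := by omega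
    simp [h1, h2]

theorem testBit_bxor (a b : Int) (n : Nat) :
    (PySem.Int.bxor a b).testBit n = xor (a.testBit n) (b.testBit n) := by
  rw [bxor_eq_xor, Int.testBit_lxor]

theorem bxor_eq_zero (a b : Int) (h : PySem.Int.bxor a b = 0) : a = b := by
  rw [bxor_eq_xor] at h
  rcases a with m | m <;> rcases b with k | k <;> simp only [Int.xor] at h
  · simp only [Int.ofNat_eq_coe, Nat.cast_inj] at h ⊢
    exact Nat.eq_of_xor_eq_zero (by exact_mod_cast h)
  · exact absurd h (by simp [Int.negSucc_eq]; omega)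
  · exact absurd h (by simp [Int.negSucc_eq]; omega)
  · have : m ^^^ k = 0 := by exact_mod_cast h
    have := Nat.eq_of_xor_eq_zero this
    simp [this]

theorem one_shiftLeft_nat (k : Nat) : (1 : Int) <<< k = 2 ^ k := by
  simp [Int.shiftLeft_eq]

theorem cmpLoop_eq (a b : Int) (n : Nat) :
    cmpLoop a (PySem.Int.bxor a b) (PySem.List.pyRange ((n : Int) - 1) (-1) (-1)) =
      (if b % 2 ^ n ≤ a % 2 ^ n then 1 else 0) := by
  induction n with
  | zero =>
    rw [show ((0 : Nat) : Int) - 1 = -1 by norm_num,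
        PySem.List.pyRange_neg_one_eq_nil (by omega)]
    simp [cmpLoop]
  | succ k ih =>
    rw [show ((k + 1 : Nat) : Int) - 1 = (k : Int) by push_cast; ring,
        PySem.List.pyRange_neg_one_cons (show (-1:Int) < (k:Int) by omega)]
    rw [cmpLoop]
    have hmask : (1 : Int) <<< ((k : Int)).toNat = 2 ^ k := by
      rw [Int.toNat_natCast, one_shiftLeft_nat]
    have hpk : (0 : Int) < 2 ^ k := by positivity
    have ha := testBit_arith a k
    have hb := testBit_arith b k
    have hba := Int.emod_nonneg a (show (2 : Int) ^ k ≠ 0 by omega)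
    have hbb := Int.emod_nonneg b (show (2 : Int) ^ k ≠ 0 by omega)
    have hla := Int.emod_lt_of_pos a hpk
    have hlb := Int.emod_lt_of_pos b hpk
    have hsplit : ((2 : Int) ^ (k + 1)) = 2 * 2 ^ k := by ring
    simp only [hmask, band_two_pow, testBit_bxor, ih]
    cases hta : a.testBit k <;> cases htb : b.testBit k <;>
      simp only [hta, htb] at ha hb ⊢ <;>
      norm_num at ha hb ⊢ <;>
      first
        | omega
        | (split_ifs <;> omega)

theorem compare_01_values_main (a b bp : Int) (hpre : 1 ≤ bp) :
    compare_01_values a b bp = compare_01_values_alt a b bp := by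
  unfold compare_01_values compare_01_values_alt
  have hbp : bp = ((bp.toNat : Nat) : Int) := by omega
  have hmask : ((1 : Int) <<< bp.toNat) - 1 = 2 ^ bp.toNat - 1 := by
    rw [one_shiftLeft_nat]
  simp only [hmask, band_mask]
  by_cases hz : PySem.Int.bxor a b = 0
  · have hab : a = b := bxor_eq_zero a b hz
    simp [hz, hab]
  · rw [if_neg hz, show bp - 1 = ((bp.toNat : Nat) : Int) - 1 by omega,
        cmpLoop_eq a b bp.toNat]

-- ===== VERDICT (by name: the statement is the Claim_ definition above) =====
theorem compare_01_values_spec : Claim_equal_compare_01_values := by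
  intro a b bp _hdom hpre
  unfold Spec_compare_01_values
  exact compare_01_values_main a b bp hpre
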